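-- pv_equiv track=rewrite | github.com/DanielleB-R/advent-of-code | 2017/day3/day3.py | spiral_coords
-- ===== SOURCE A (Python) =====
-- RIGHT = 0
--
-- UP = 1
--
-- LEFT = 2
--
-- DOWN = 3
--
-- def turn(direction):
--     return (direction + 1) & 0x03
--
-- def spiral_coords(n):
--     assert n > 0
--     current = 1
--     x = 0
--     y = 0
--     direction = RIGHT
--     side_length = 1
--     side_count = 0
--     second_side = False
--
--     while current != n:
--         current += 1
--         # first advance
--         if direction == RIGHT:
--             x += 1
--         elif direction == UP:
--             y += 1
--         elif direction == LEFT: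
--             x -= 1
--         elif direction == DOWN:
--             y -= 1
--
--         # then adjust the direction
--         side_count += 1
--         if side_count == side_length:
--             direction = turn(direction)
--             if second_side:
--                 second_side = False
--                 side_length += 1
--             else:
--                 second_side = True
--             side_count = 0
--     return (x, y)
-- ===== SOURCE B (Python) =====
-- # B: closed-form ring lookup (find ring k in O(sqrt n), then direct offset formula)
-- # instead of A's step-by-step O(n) spiral walk.
-- def spiral_coords(n):
--     assert n > 0
--     k = 0
--     while (2 * k + 1) ** 2 < n:
--         k += 1
--     j = n - (2 * k - 1) ** 2 - 1
--     if j <= 2 * k - 1: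
--         return (k, j - k + 1)
--     if j <= 4 * k - 1:
--         return (3 * k - 1 - j, k)
--     if j <= 6 * k - 1:
--         return (-k, 5 * k - 1 - j)
--     return (j - 7 * k + 1, -k)
-- ===== Notes on version B (the rewrite author's own statement) =====
-- stated objective: faster
-- what changed: Replaced A's cell-by-cell simulation of the spiral walk (n-1 iterations with direction/side-length bookkeeping) by finding the ring index k with an O(sqrt n) search and computing the coordinates directly from the offset within the ring by a closed-form four-branch formula.
import Mathlib
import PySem

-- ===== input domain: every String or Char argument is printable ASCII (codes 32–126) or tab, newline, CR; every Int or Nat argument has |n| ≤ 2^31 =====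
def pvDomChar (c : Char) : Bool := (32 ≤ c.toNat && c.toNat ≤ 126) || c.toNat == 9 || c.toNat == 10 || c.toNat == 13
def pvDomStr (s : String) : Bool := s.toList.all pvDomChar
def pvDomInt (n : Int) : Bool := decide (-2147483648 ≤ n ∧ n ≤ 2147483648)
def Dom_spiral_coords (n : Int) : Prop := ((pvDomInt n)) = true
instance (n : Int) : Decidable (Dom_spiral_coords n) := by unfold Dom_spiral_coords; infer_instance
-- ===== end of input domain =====

-- B replaces A's O(n) step-by-step spiral walk by an O(sqrt n) ring search plus a
-- closed-form offset formula (objective: faster, asymptotic).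

-- ===== PORT A =====
-- Loop state of A's while-loop: position, direction, side bookkeeping.
structure SpState where
  x : Int
  y : Int
  dir : Int
  sl : Int
  sc : Int
  ss : Bool
deriving DecidableEq, Repr

def turnA (d : Int) : Int := PySem.Int.band (d + 1) 3  -- (direction + 1) & 0x03

-- one iteration of A's while-body (advance, then adjust direction)
def stepA (s : SpState) : SpState :=
  let p : Int × Int :=
    if s.dir = 0 then (s.x + 1, s.y)
    else if s.dir = 1 then (s.x, s.y + 1)
    else if s.dir = 2 then (s.x - 1, s.y)
    else if s.dir = 3 then (s.x, s.y - 1)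
    else (s.x, s.y)
  let sc := s.sc + 1
  if sc = s.sl then
    ⟨p.1, p.2, turnA s.dir, if s.ss then s.sl + 1 else s.sl, 0, !s.ss⟩
  else
    ⟨p.1, p.2, s.dir, s.sl, sc, s.ss⟩

-- the while-loop runs exactly (n-1) times (current goes 1,2,…,n)
def loopA : Nat → SpState → SpState
  | 0, s => s
  | f + 1, s => loopA f (stepA s)

def spiral_coords (n : Int) : List Int :=
  if n > 0 then
    let s := loopA (n - 1).toNat ⟨0, 0, 0, 1, 0, false⟩
    [s.x, s.y]
  else []  -- Python raises AssertionError here (outside Pre_)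

-- ===== PORT B =====
-- while (2k+1)^2 < n: k += 1
def findRing (n : Int) (k : Nat) : Nat :=
  if (2 * (k : Int) + 1) ^ 2 < n then findRing n (k + 1) else k
termination_by (n - (2 * (k : Int) + 1) ^ 2).toNat
decreasing_by
  have h1 : (2 * ((k : Int) + 1) + 1) ^ 2 = (2 * (k : Int) + 1) ^ 2 + (8 * (k : Int) + 8) := by ring
  have h2 : (0 : Int) ≤ (k : Int) := Int.natCast_nonneg k
  simp only [Nat.cast_add, Nat.cast_one]
  omega

def spiral_coords_alt (n : Int) : List Int :=
  if n > 0 then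
    let k : Int := (findRing n 0 : Nat)
    let j := n - (2 * k - 1) ^ 2 - 1
    if j ≤ 2 * k - 1 then [k, j - k + 1]
    else if j ≤ 4 * k - 1 then [3 * k - 1 - j, k]
    else if j ≤ 6 * k - 1 then [-k, 5 * k - 1 - j]
    else [j - 7 * k + 1, -k]
  else []  -- Python raises AssertionError here (outside Pre_)

-- ===== PRECONDITION & SPEC =====
-- Pre_ excludes exactly n ≤ 0, where A's `assert n > 0` raises AssertionError.
def Pre_spiral_coords (n : Int) : Prop := 0 < n
instance (n : Int) : Decidable (Pre_spiral_coords n) := by unfold Pre_spiral_coords; infer_instance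
def pvWitness_spiral_coords : Int := (5)

def Spec_spiral_coords (n : Int) (out : List Int) : Prop := out = spiral_coords_alt n
instance (n : Int) (out : List Int) : Decidable (Spec_spiral_coords n out) := by unfold Spec_spiral_coords; infer_instance

-- ===== CLAIM (what is proved, stated in full; the proofs are below) =====
def Claim_equal_spiral_coords : Prop := ∀ (n : Int), Dom_spiral_coords n → Pre_spiral_coords n → Spec_spiral_coords n (spiral_coords n)

-- ===== LEMMAS AND PROOFS =====

def dxA (d : Int) : Int := if d = 0 then 1 else if d = 2 then -1 else 0
def dyA (d : Int) : Int := if d = 1 then 1 else if d = 3 then -1 else 0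

theorem loopA_add (a b : Nat) (s : SpState) : loopA (a + b) s = loopA b (loopA a s) := by
  induction a generalizing s with
  | zero => simp [loopA]
  | succ a ih =>
      have : a + 1 + b = (a + b) + 1 := by omega
      rw [show a + 1 + b = a + b + 1 by omega]
      simpa [loopA] using ih (stepA s)

-- interior of a side: full state after d straight steps
theorem loopA_straight (d : Nat) (s : SpState) (h : s.sc + d < s.sl) :
    loopA d s = ⟨s.x + d * dxA s.dir, s.y + d * dyA s.dir, s.dir, s.sl, s.sc + d, s.ss⟩ := by
  induction d generalizing s with
  | zero => simp [loopA]
  | succ d ih =>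
      have hne : s.sc + 1 ≠ s.sl := by push_cast at h ⊢; omega
      have hrec := ih (stepA s) (by
        simp only [stepA, hne, if_neg hne]
        push_cast at h ⊢; omega)
      simp only [loopA]
      rw [hrec]
      simp only [stepA, if_neg hne]
      by_cases h0 : s.dir = 0 <;> by_cases h1 : s.dir = 1 <;> by_cases h2 : s.dir = 2 <;>
        by_cases h3 : s.dir = 3 <;>
        simp_all [dxA, dyA] <;> omega

-- position after d steps, boundary inclusive (the turn does not move)
theorem loopA_pos (d : Nat) (s : SpState) (h : s.sc + d ≤ s.sl) :
    (loopA d s).x = s.x + d * dxA s.dir ∧ (loopA d s).y = s.y + d * dyA s.dir := by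
  rcases lt_or_eq_of_le h with hlt | heq
  · rw [loopA_straight d s hlt]; exact ⟨rfl, rfl⟩
  · -- d = sl - sc exactly: take d-1 straight steps, then one turning step
    cases d with
    | zero => simp [loopA] at heq ⊢
    | succ d =>
        have hs : loopA d s = ⟨s.x + d * dxA s.dir, s.y + d * dyA s.dir, s.dir, s.sl, s.sc + d, s.ss⟩ :=
          loopA_straight d s (by push_cast at heq ⊢; omega)
        rw [loopA_add d 1, hs]
        have hb : (s.sc + d) + 1 = s.sl := by push_cast at heq ⊢; omega
        simp only [loopA, stepA, hb, if_pos rfl]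
        by_cases h0 : s.dir = 0 <;> by_cases h1 : s.dir = 1 <;> by_cases h2 : s.dir = 2 <;>
          by_cases h3 : s.dir = 3 <;>
          simp_all [dxA, dyA] <;> omega

-- one full side of length m = sl, starting with sc = 0
theorem loopA_side (m : Nat) (s : SpState) (hsc : s.sc = 0) (hm : (m : Int) = s.sl) (hpos : 0 < m) :
    loopA m s = ⟨s.x + m * dxA s.dir, s.y + m * dyA s.dir, turnA s.dir,
                 if s.ss then s.sl + 1 else s.sl, 0, !s.ss⟩ := by
  cases m with
  | zero => omega
  | succ d =>
      have hs : loopA d s = ⟨s.x + d * dxA s.dir, s.y + d * dyA s.dir, s.dir, s.sl, s.sc + d, s.ss⟩ :=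
        loopA_straight d s (by push_cast at hm ⊢; omega)
      rw [loopA_add d 1, hs]
      have hb : (s.sc + d) + 1 = s.sl := by push_cast at hm ⊢; omega
      simp only [loopA, stepA, hb, if_pos rfl]
      by_cases h0 : s.dir = 0 <;> by_cases h1 : s.dir = 1 <;> by_cases h2 : s.dir = 2 <;>
        by_cases h3 : s.dir = 3 <;>
        simp_all [dxA, dyA] <;> omega

def cornerA (k : Nat) : SpState := ⟨-(k : Int), -(k : Int), 0, 2 * k + 1, 0, false⟩

theorem turnA_0 : turnA 0 = 1 := by decide
theorem turnA_1 : turnA 1 = 2 := by decide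
theorem turnA_2 : turnA 2 = 3 := by decide
theorem turnA_3 : turnA 3 = 0 := by decide

-- the four sides of ring (k+1), starting at the ring-k corner
theorem sideR (k : Nat) :
    loopA (2 * k + 1) (cornerA k) = ⟨(k : Int) + 1, -(k : Int), 1, 2 * k + 1, 0, true⟩ := by
  rw [loopA_side (2 * k + 1) (cornerA k) rfl (by simp [cornerA]; try (push_cast; ring)) (by omega)]
  simp [cornerA, turnA_0, dxA, dyA]
  try omega

theorem sideU (k : Nat) :
    loopA (2 * k + 1) (⟨(k : Int) + 1, -(k : Int), 1, 2 * k + 1, 0, true⟩ : SpState)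
      = ⟨(k : Int) + 1, (k : Int) + 1, 2, 2 * k + 2, 0, false⟩ := by
  rw [loopA_side (2 * k + 1) _ rfl (by push_cast; ring) (by omega)]
  simp [turnA_1, dxA, dyA]
  try omega

theorem sideL (k : Nat) :
    loopA (2 * k + 2) (⟨(k : Int) + 1, (k : Int) + 1, 2, 2 * k + 2, 0, false⟩ : SpState)
      = ⟨-(k : Int) - 1, (k : Int) + 1, 3, 2 * k + 2, 0, true⟩ := by
  rw [loopA_side (2 * k + 2) _ rfl (by push_cast; ring) (by omega)]
  simp [turnA_2, dxA, dyA]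
  try omega

theorem sideD (k : Nat) :
    loopA (2 * k + 2) (⟨-(k : Int) - 1, (k : Int) + 1, 3, 2 * k + 2, 0, true⟩ : SpState)
      = ⟨-(k : Int) - 1, -(k : Int) - 1, 0, 2 * k + 3, 0, false⟩ := by
  rw [loopA_side (2 * k + 2) _ rfl (by push_cast; ring) (by omega)]
  simp [turnA_3, dxA, dyA]
  try omega

-- after 2k(2k+1) steps A sits at the ring-k corner (-k,-k) heading RIGHT with side 2k+1
theorem loopA_corner (k : Nat) : loopA (2 * k * (2 * k + 1)) ⟨0, 0, 0, 1, 0, false⟩ = cornerA k := by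
  induction k with
  | zero => simp [loopA, cornerA]
  | succ k ih =>
      have hsplit : 2 * (k + 1) * (2 * (k + 1) + 1)
          = 2 * k * (2 * k + 1) + (2 * k + 1) + (2 * k + 1) + (2 * k + 2) + (2 * k + 2) := by ring
      rw [hsplit,
        loopA_add (2 * k * (2 * k + 1) + (2 * k + 1) + (2 * k + 1) + (2 * k + 2)) (2 * k + 2),
        loopA_add (2 * k * (2 * k + 1) + (2 * k + 1) + (2 * k + 1)) (2 * k + 2),
        loopA_add (2 * k * (2 * k + 1) + (2 * k + 1)) (2 * k + 1),
        loopA_add (2 * k * (2 * k + 1)) (2 * k + 1), ih,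
        sideR k, sideU k, sideL k, sideD k]
      simp [cornerA, SpState.mk.injEq]
      try omega

-- findRing returns the least ring: result K has n ≤ (2K+1)^2 and (K = 0 or (2K-1)^2 < n)
theorem findRing_spec (n : Int) (k0 : Nat) (h0 : k0 = 0 ∨ (2 * (k0 : Int) - 1) ^ 2 < n) :
    n ≤ (2 * (findRing n k0 : Int) + 1) ^ 2 ∧
      (findRing n k0 = 0 ∨ (2 * (findRing n k0 : Int) - 1) ^ 2 < n) := by
  unfold findRing
  split
  · next h =>
      have := findRing_spec n (k0 + 1) (Or.inr (by push_cast; nlinarith))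
      simpa using this
  · next h => exact ⟨by omega, h0⟩
termination_by (n - (2 * (k0 : Int) + 1) ^ 2).toNat
decreasing_by
  have h1 : (2 * ((k0 : Int) + 1) + 1) ^ 2 = (2 * (k0 : Int) + 1) ^ 2 + (8 * (k0 : Int) + 8) := by ring
  have h2 : (0 : Int) ≤ (k0 : Int) := Int.natCast_nonneg k0
  simp only [Nat.cast_add, Nat.cast_one]
  omega

theorem alt_eval (n : Int) (hn : 0 < n) (K : Nat) (hK : findRing n 0 = K) (S j : Int)
    (hSdef : S = (2 * (K : Int) - 1) ^ 2) (hjdef : j = n - S - 1) :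
    spiral_coords_alt n =
      (if j ≤ 2 * (K : Int) - 1 then [(K : Int), j - K + 1]
      else if j ≤ 4 * (K : Int) - 1 then [3 * K - 1 - j, (K : Int)]
      else if j ≤ 6 * (K : Int) - 1 then [-(K : Int), 5 * K - 1 - j]
      else [j - 7 * K + 1, -(K : Int)]) := by
  subst hjdef hSdef
  simp [spiral_coords_alt, hn, hK]

theorem spiral_coords_eq (n : Int) (hn : 0 < n) : spiral_coords n = spiral_coords_alt n := by
  obtain ⟨K, hKdef⟩ : ∃ K, findRing n 0 = K := ⟨_, rfl⟩
  have hspec := findRing_spec n 0 (Or.inl rfl)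
  rw [hKdef] at hspec
  obtain ⟨hub, hlb⟩ := hspec
  have hA : spiral_coords n
      = [(loopA (n - 1).toNat ⟨0, 0, 0, 1, 0, false⟩).x,
         (loopA (n - 1).toNat ⟨0, 0, 0, 1, 0, false⟩).y] := by
    simp [spiral_coords, hn]
  cases K with
  | zero =>
      have hn1 : n = 1 := by norm_num at hub; omega
      subst hn1
      rw [hA, alt_eval 1 hn 0 hKdef 1 (-1) (by norm_num) (by norm_num)]
      norm_num [loopA]
  | succ K1 =>
      obtain ⟨S, hS⟩ : ∃ t : Int, t = (2 * (K1 : Int) + 1) ^ 2 := ⟨_, rfl⟩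
      obtain ⟨j, hjdef⟩ : ∃ t : Int, t = n - S - 1 := ⟨_, rfl⟩
      obtain ⟨Cf, hCf⟩ : ∃ C : Nat, C = 2 * K1 * (2 * K1 + 1) := ⟨_, rfl⟩
      have hCfS : (Cf : Int) + (2 * (K1 : Int) + 1) = S := by rw [hCf, hS]; push_cast; ring
      have hlow : S < n := by
        rcases hlb with h | h
        · exact absurd h (by omega)
        · push_cast at h
          have heq : (2 * ((K1 : Int) + 1) - 1) ^ 2 = (2 * (K1 : Int) + 1) ^ 2 := by ring
          rw [heq] at h
          rw [hS]; exact h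
      have hub' : n ≤ S + 8 * (K1 : Int) + 8 := by
        push_cast at hub
        have heq : (2 * ((K1 : Int) + 1) + 1) ^ 2 = (2 * (K1 : Int) + 1) ^ 2 + (8 * (K1 : Int) + 8) := by
          ring
        rw [heq, ← hS] at hub
        omega
      have hcor : loopA Cf ⟨0, 0, 0, 1, 0, false⟩ = cornerA K1 := by rw [hCf]; exact loopA_corner K1
      rw [hA, alt_eval n hn (K1 + 1) hKdef S j (by rw [hS]; push_cast; ring) hjdef]
      split_ifs with h1 h2 h3
      · -- right side of the ring
        push_cast at h1
        obtain ⟨D, hD⟩ : ∃ D : Nat, (D : Int) = j := ⟨_, Int.toNat_of_nonneg (by omega)⟩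
        have hfN : (n - 1).toNat = Cf + (2 * K1 + 1) + D := by omega
        rw [hfN, loopA_add (Cf + (2 * K1 + 1)) D, loopA_add Cf (2 * K1 + 1), hcor, sideR K1]
        have hp := loopA_pos D (⟨(K1 : Int) + 1, -(K1 : Int), 1, 2 * K1 + 1, 0, true⟩ : SpState)
          (by simp; omega)
        simp only [dxA, dyA] at hp
        norm_num at hp
        rw [hp.1, hp.2]
        simp only [List.cons.injEq, and_true]
        constructor <;> push_cast <;> omega
      · -- top side
        push_cast at h1 h2
        obtain ⟨D, hD⟩ : ∃ D : Nat, (D : Int) = j - (2 * (K1 : Int) + 1) :=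
          ⟨_, Int.toNat_of_nonneg (by omega)⟩
        have hfN : (n - 1).toNat = Cf + (2 * K1 + 1) + (2 * K1 + 1) + D := by omega
        rw [hfN, loopA_add (Cf + (2 * K1 + 1) + (2 * K1 + 1)) D,
          loopA_add (Cf + (2 * K1 + 1)) (2 * K1 + 1), loopA_add Cf (2 * K1 + 1),
          hcor, sideR K1, sideU K1]
        have hp := loopA_pos D (⟨(K1 : Int) + 1, (K1 : Int) + 1, 2, 2 * K1 + 2, 0, false⟩ : SpState)
          (by simp; omega)
        simp only [dxA, dyA] at hp
        norm_num at hp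
        rw [hp.1, hp.2]
        simp only [List.cons.injEq, and_true]
        constructor <;> push_cast <;> omega
      · -- left side
        push_cast at h1 h2 h3
        obtain ⟨D, hD⟩ : ∃ D : Nat, (D : Int) = j - (4 * (K1 : Int) + 3) :=
          ⟨_, Int.toNat_of_nonneg (by omega)⟩
        have hfN : (n - 1).toNat = Cf + (2 * K1 + 1) + (2 * K1 + 1) + (2 * K1 + 2) + D := by omega
        rw [hfN, loopA_add (Cf + (2 * K1 + 1) + (2 * K1 + 1) + (2 * K1 + 2)) D,
          loopA_add (Cf + (2 * K1 + 1) + (2 * K1 + 1)) (2 * K1 + 2),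
          loopA_add (Cf + (2 * K1 + 1)) (2 * K1 + 1), loopA_add Cf (2 * K1 + 1),
          hcor, sideR K1, sideU K1, sideL K1]
        have hp := loopA_pos D (⟨-(K1 : Int) - 1, (K1 : Int) + 1, 3, 2 * K1 + 2, 0, true⟩ : SpState)
          (by simp; omega)
        simp only [dxA, dyA] at hp
        norm_num at hp
        rw [hp.1, hp.2]
        simp only [List.cons.injEq, and_true]
        constructor <;> push_cast <;> omega
      · -- bottom side
        push_cast at h1 h2 h3
        obtain ⟨D, hD⟩ : ∃ D : Nat, (D : Int) = j - (6 * (K1 : Int) + 5) :=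
          ⟨_, Int.toNat_of_nonneg (by omega)⟩
        have hfN : (n - 1).toNat
            = Cf + (2 * K1 + 1) + (2 * K1 + 1) + (2 * K1 + 2) + (2 * K1 + 2) + D := by omega
        rw [hfN,
          loopA_add (Cf + (2 * K1 + 1) + (2 * K1 + 1) + (2 * K1 + 2) + (2 * K1 + 2)) D,
          loopA_add (Cf + (2 * K1 + 1) + (2 * K1 + 1) + (2 * K1 + 2)) (2 * K1 + 2),
          loopA_add (Cf + (2 * K1 + 1) + (2 * K1 + 1)) (2 * K1 + 2),
          loopA_add (Cf + (2 * K1 + 1)) (2 * K1 + 1), loopA_add Cf (2 * K1 + 1),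
          hcor, sideR K1, sideU K1, sideL K1, sideD K1]
        have hp := loopA_pos D (⟨-(K1 : Int) - 1, -(K1 : Int) - 1, 0, 2 * K1 + 3, 0, false⟩ : SpState)
          (by simp; omega)
        simp only [dxA, dyA] at hp
        norm_num at hp
        rw [hp.1, hp.2]
        simp only [List.cons.injEq, and_true]
        constructor <;> push_cast <;> omega

-- ===== VERDICT (by name: the statement is the Claim_ definition above) =====
theorem spiral_coords_spec : Claim_equal_spiral_coords := by
  intro n _ hpre
  exact spiral_coords_eq n hpre
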